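-- pv_equiv track=rewrite | github.com/sjmeis/DPMLM | DPMLM.py | nth_repl
-- ===== SOURCE A (Python) =====
-- def nth_repl(s, sub, repl, n):
--     s_split = s.split()
--     i = 0
--     try:
--         find = s_split.index(sub)
--         i += 1
--     except ValueError:
--         return s
--
--     while i != n:
--         try:
--             find = s_split.index(sub, find + 1)
--             i += 1
--         except ValueError:
--             break
--     if i == n:
--         return " ".join(s_split[:find] + [repl] + s_split[find+1:])
--     return s
-- ===== SOURCE B (Python) =====
-- def nth_repl(s, sub, repl, n):
--     toks = s.split()
--     positions = [i for i, w in enumerate(toks) if w == sub]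
--     if 1 <= n <= len(positions):
--         k = positions[n - 1]
--         return " ".join(toks[:k] + [repl] + toks[k + 1:])
--     return s
-- ===== Notes on version B (the rewrite author's own statement) =====
-- stated objective: simpler
-- what changed: B replaces A's try/except loop of repeated early-stopping list.index scans with one pass that collects all token positions of sub and then selects the (n-1)-th, guarded by 1 <= n <= len(positions).
import Mathlib
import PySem

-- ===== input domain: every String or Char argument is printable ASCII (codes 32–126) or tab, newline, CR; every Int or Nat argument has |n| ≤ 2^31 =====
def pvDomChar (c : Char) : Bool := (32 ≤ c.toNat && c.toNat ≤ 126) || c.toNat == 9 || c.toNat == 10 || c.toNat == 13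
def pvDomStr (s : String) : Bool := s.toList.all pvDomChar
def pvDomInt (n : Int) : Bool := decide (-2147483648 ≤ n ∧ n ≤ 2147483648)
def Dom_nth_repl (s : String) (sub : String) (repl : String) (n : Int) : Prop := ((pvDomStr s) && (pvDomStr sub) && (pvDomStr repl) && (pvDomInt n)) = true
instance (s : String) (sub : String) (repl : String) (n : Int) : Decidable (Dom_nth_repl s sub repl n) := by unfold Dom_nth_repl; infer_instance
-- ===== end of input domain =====

-- B replaces A's try/except loop of repeated early-stopping list.index scans with one
-- collect-all-positions pass plus a guarded selection of the (n-1)-th position (objective: simpler).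

-- ===== PORT A =====
-- A's while-loop: state (find, i); each step does s_split.index(sub, find+1), ported as
-- index? on the dropped suffix with the offset added back (exact for list.index with a start).
-- Returns some find when the loop ends with i == n, none when it ends by the break (ValueError).
def nthReplScan (sp : List String) (sub : String) (n : Int) (find : Nat) (i : Int) : Option Nat :=
  if i = n then some find
  else
    match h : PySem.List.index? (sp.drop (find + 1)) sub with
    | some k => nthReplScan sp sub n (find + 1 + k) (i + 1)
    | none => none
termination_by sp.length - find
decreasing_by
  obtain ⟨hk, -⟩ := PySem.List.getElem_of_index?_eq_some h
  simp [List.length_drop] at hk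
  omega

def nth_repl (s : String) (sub : String) (repl : String) (n : Int) : String :=
  let sp := PySem.Str.split₀ s
  match PySem.List.index? sp sub with
  | none => s
  | some f0 =>
    match nthReplScan sp sub n f0 1 with
    | some find =>
        PySem.Str.join " "
          (PySem.List.slice sp none (some (find : Int)) ++ [repl] ++
           PySem.List.slice sp (some ((find : Int) + 1)) none)
    | none => s

-- ===== PORT B =====
def nth_repl_alt (s : String) (sub : String) (repl : String) (n : Int) : String :=
  let toks := PySem.Str.split₀ s
  let positions := ((PySem.List.enumerate toks).filter (fun p => p.2 == sub)).map Prod.fst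
  if 1 ≤ n ∧ n ≤ (positions.length : Int) then
    let k := PySem.List.pyGetD positions (n - 1) 0
    PySem.Str.join " "
      (PySem.List.slice toks none (some k) ++ [repl] ++
       PySem.List.slice toks (some (k + 1)) none)
  else s

-- ===== PRECONDITION & SPEC =====
def Spec_nth_repl (s : String) (sub : String) (repl : String) (n : Int) (out : String) : Prop := out = nth_repl_alt s sub repl n
instance (s : String) (sub : String) (repl : String) (n : Int) (out : String) : Decidable (Spec_nth_repl s sub repl n out) := by unfold Spec_nth_repl; infer_instance

-- ===== CLAIM (what is proved, stated in full; the proofs are below) =====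
def Claim_equal_nth_repl : Prop := ∀ (s : String) (sub : String) (repl : String) (n : Int), Dom_nth_repl s sub repl n → Spec_nth_repl s sub repl n (nth_repl s sub repl n)

-- ===== LEMMAS AND PROOFS =====

-- positions (0-based, in order) of tokens equal to sub, starting the numbering at j
def occs (sub : String) : List String → Nat → List Nat
  | [], _ => []
  | w :: ws, j => if w = sub then j :: occs sub ws (j + 1) else occs sub ws (j + 1)

theorem occ_enum (sub : String) (ws : List String) (j : Nat) :
    ((PySem.List.enumerate ws (j : Int)).filter (fun p => p.2 == sub)).map Prod.fst
      = (occs sub ws j).map (Nat.cast : Nat → Int) := by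
  induction ws generalizing j with
  | nil => simp [occs, PySem.List.enumerate_nil]
  | cons w ws ih =>
    have h1 : (j : Int) + 1 = ((j + 1 : Nat) : Int) := by push_cast; ring
    rw [PySem.List.enumerate_cons, List.filter_cons, h1, occs]
    by_cases hw : w = sub
    · rw [if_pos hw]
      have hb : ((((j : Int), w) : Int × String).2 == sub) = true := by simp [hw]
      simp only [hb, if_true, List.map_cons, ih (j + 1)]
    · rw [if_neg hw]
      have hb : ((((j : Int), w) : Int × String).2 == sub) = false := by simp [hw]
      simp only [hb, Bool.false_eq_true, if_false, ih (j + 1)]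

theorem occ_index_none (sub : String) (ws : List String) (j : Nat)
    (h : PySem.List.index? ws sub = none) : occs sub ws j = [] := by
  induction ws generalizing j with
  | nil => simp [occs]
  | cons w ws ih =>
    by_cases hw : w = sub
    · subst hw; rw [PySem.List.index?_cons_self] at h; cases h
    · rw [PySem.List.index?_cons_of_ne ws hw] at h
      simp only [Option.map_eq_none_iff] at h
      simp [occs, hw, ih _ h]

theorem occ_index_some (sub : String) (ws : List String) (j k : Nat)
    (h : PySem.List.index? ws sub = some k) :
    occs sub ws j = (j + k) :: occs sub (ws.drop (k + 1)) (j + k + 1) := by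
  induction ws generalizing j k with
  | nil => simp [PySem.List.index?] at h
  | cons w ws ih =>
    by_cases hw : w = sub
    · subst hw
      rw [PySem.List.index?_cons_self] at h
      cases h
      simp [occs]
    · rw [PySem.List.index?_cons_of_ne ws hw] at h
      match hk' : PySem.List.index? ws sub with
      | none => rw [hk'] at h; cases h
      | some k' =>
        rw [hk'] at h
        simp only [Option.map_some, Option.some.injEq] at h
        subst h
        simp only [occs, hw, if_false, ih (j + 1) k' hk', List.drop_succ_cons]
        rw [show j + (k' + 1) = j + 1 + k' from by omega]

-- A's loop read off the list of remaining occurrence positions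
def walk (n : Int) : List Nat → Int → Nat → Option Nat
  | [], i, f => if i = n then some f else none
  | k :: L', i, f => if i = n then some f else walk n L' (i + 1) k

theorem walk_of_eq (n : Int) (L : List Nat) (i : Int) (f : Nat) (h : i = n) :
    walk n L i f = some f := by
  cases L <;> rw [walk] <;> simp [h]

theorem scan_eq_walk_aux (sub : String) (n : Int) (sp : List String) :
    ∀ d find i, sp.length - find ≤ d →
      nthReplScan sp sub n find i = walk n (occs sub (sp.drop (find + 1)) (find + 1)) i find := by
  intro d
  induction d with
  | zero =>
    intro find i hd
    have hdrop : sp.drop (find + 1) = [] := by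
      apply List.drop_eq_nil_of_le; omega
    have hidx : PySem.List.index? (sp.drop (find + 1)) sub = none := by
      rw [hdrop]; simp [PySem.List.index?]
    rw [nthReplScan, hdrop]
    by_cases hin : i = n
    · rw [walk_of_eq n _ i find hin]; simp [hin]
    · rw [hdrop] at hidx
      simp only [occs, walk, hin, if_false]
      split
      · rename_i k hk
        rw [hidx] at hk; cases hk
      · rfl
  | succ d ih =>
    intro find i hd
    rw [nthReplScan]
    by_cases hin : i = n
    · rw [walk_of_eq n _ i find hin]; simp [hin]
    · simp only [hin, if_false]
      split
      · rename_i k h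
        rw [occ_index_some sub _ _ _ h, walk, if_neg hin,
            ih (find + 1 + k) (i + 1) (by
              obtain ⟨hk, -⟩ := PySem.List.getElem_of_index?_eq_some h
              simp only [List.length_drop] at hk
              omega),
            List.drop_drop]
        rw [show find + 1 + (k + 1) = find + 1 + k + 1 from by omega]
      · rename_i h
        rw [occ_index_none sub _ _ h, walk, if_neg hin]

theorem walk_spec (n : Int) (L : List Nat) : ∀ i f,
    walk n L i f = if i ≤ n ∧ n ≤ i + (L.length : Int)
                   then some ((f :: L).getD (n - i).toNat 0) else none := by
  induction L with
  | nil =>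
    intro i f
    rw [walk]
    by_cases hin : i = n
    · simp [hin]
    · simp only [hin, if_false]
      split_ifs with hc
      · exfalso; simp only [List.length_nil, Nat.cast_zero] at hc; omega
      · rfl
  | cons k L' ih =>
    intro i f
    rw [walk]
    by_cases hin : i = n
    · simp [hin]
      omega
    · simp only [hin, if_false, ih (i + 1) k]
      by_cases hle : i + 1 ≤ n ∧ n ≤ i + 1 + (L'.length : Int)
      · have hle' : i ≤ n ∧ n ≤ i + ((k :: L').length : Int) := by
          simp only [List.length_cons]; push_cast; omega
        rw [if_pos hle, if_pos hle']
        have h1 : (n - i).toNat = (n - (i + 1)).toNat + 1 := by omega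
        rw [h1]
        simp [List.getD]
      · have hle' : ¬ (i ≤ n ∧ n ≤ i + ((k :: L').length : Int)) := by
          simp only [List.length_cons]; push_cast
          push_cast at hle
          omega
        rw [if_neg hle, if_neg hle']

theorem getD_map_cast (L : List Nat) (m : Nat) (hm : m < L.length) :
    (L.map (Nat.cast : Nat → Int)).getD m 0 = ((L.getD m 0 : Nat) : Int) := by
  rw [List.getD_eq_getElem _ _ (by simpa using hm), List.getD_eq_getElem _ _ hm]
  simp

-- ===== VERDICT (by name: the statement is the Claim_ definition above) =====
theorem nth_repl_spec : Claim_equal_nth_repl := by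
  intro s sub repl n _
  unfold Spec_nth_repl nth_repl nth_repl_alt
  dsimp only
  have henum := occ_enum sub (PySem.Str.split₀ s) 0
  rw [Nat.cast_zero] at henum
  rw [henum]
  match h0 : PySem.List.index? (PySem.Str.split₀ s) sub with
  | none =>
    rw [occ_index_none sub _ 0 h0]
    have hc : ¬ (1 ≤ n ∧ n ≤ ((([] : List Nat).map (Nat.cast : Nat → Int)).length : Int)) := by
      simp only [List.map_nil, List.length_nil, Nat.cast_zero]
      omega
    rw [if_neg hc]
  | some f0 =>
    rw [occ_index_some sub _ 0 f0 h0]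
    simp only [Nat.zero_add]
    rw [scan_eq_walk_aux sub n (PySem.Str.split₀ s) (PySem.Str.split₀ s).length f0 1 (by omega),
        walk_spec]
    by_cases hc : 1 ≤ n ∧ n ≤ 1 + ((occs sub ((PySem.Str.split₀ s).drop (f0 + 1)) (f0 + 1)).length : Int)
    · have hc' : 1 ≤ n ∧ n ≤ (((f0 :: occs sub ((PySem.Str.split₀ s).drop (f0 + 1)) (f0 + 1)).map (Nat.cast : Nat → Int)).length : Int) := by
        simp only [List.length_map, List.length_cons]
        push_cast
        omega
      rw [if_pos hc, if_pos hc']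
      have hm : (n - 1).toNat < (f0 :: occs sub ((PySem.Str.split₀ s).drop (f0 + 1)) (f0 + 1)).length := by
        simp only [List.length_cons]
        omega
      have hget : PySem.List.pyGetD ((f0 :: occs sub ((PySem.Str.split₀ s).drop (f0 + 1)) (f0 + 1)).map (Nat.cast : Nat → Int)) (n - 1) 0
            = (((f0 :: occs sub ((PySem.Str.split₀ s).drop (f0 + 1)) (f0 + 1)).getD (n - 1).toNat 0 : Nat) : Int) := by
        rw [show (n - 1 : Int) = (((n - 1).toNat : Nat) : Int) from by omega,
            PySem.List.pyGetD_natCast, getD_map_cast _ _ hm, Int.toNat_natCast]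
      rw [hget]
    · have hc' : ¬ (1 ≤ n ∧ n ≤ (((f0 :: occs sub ((PySem.Str.split₀ s).drop (f0 + 1)) (f0 + 1)).map (Nat.cast : Nat → Int)).length : Int)) := by
        simp only [List.length_map, List.length_cons]
        push_cast
        push_cast at hc
        omega
      rw [if_neg hc, if_neg hc']
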